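-- pv_equiv track=rewrite | github.com/kimukook/variable_length_oscillating_pendulum | utils.py | last_consecutives
-- ===== SOURCE A (Python) =====
-- def last_consecutives(vals, step=1):
--     """
--     Find the last consecutive group of numbers
--     :param vals:  Array, store numbers
--     :param step:  Step size for consecutive numberes, default 1
--     :return:      The last group of consecutive numbers of the input vals
--     """
--     group = []
--     expected = None
--     for val in reversed(vals):
--         if (val == expected) or (expected is None):
--             group.append(val)
--         else:
--             break
--         expected = val - step
--     return group
-- ===== SOURCE B (Python) =====
-- def last_consecutives(vals, step=1):
--     # Forward scan: find the start index of the last consecutive run,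
--     # then return the tail slice reversed.
--     start = 0
--     i = 1
--     for prev, cur in zip(vals, vals[1:]):
--         if cur != prev + step:
--             start = i
--         i += 1
--     return list(reversed(vals[start:]))
-- ===== Notes on version B (the rewrite author's own statement) =====
-- stated objective: simpler
-- what changed: Replaces A's backward accumulate-with-break loop (building the result element by element with an 'expected' sentinel) by a forward boundary-finding scan over adjacent pairs that computes the start index of the last run, followed by a single slice-and-reverse.
import Mathlib
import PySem

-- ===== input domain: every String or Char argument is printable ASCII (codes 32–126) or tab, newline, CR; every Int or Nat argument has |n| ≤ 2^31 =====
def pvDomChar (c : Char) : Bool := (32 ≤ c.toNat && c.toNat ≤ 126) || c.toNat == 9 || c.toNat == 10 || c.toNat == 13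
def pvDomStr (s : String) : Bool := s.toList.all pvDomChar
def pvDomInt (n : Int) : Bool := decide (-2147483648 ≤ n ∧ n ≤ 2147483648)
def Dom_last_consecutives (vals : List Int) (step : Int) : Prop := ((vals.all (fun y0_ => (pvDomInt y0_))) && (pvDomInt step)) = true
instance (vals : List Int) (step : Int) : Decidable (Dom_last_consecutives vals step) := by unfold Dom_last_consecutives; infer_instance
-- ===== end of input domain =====

-- B replaces A's backward accumulate-with-break loop by a forward boundary-finding
-- scan (start index of the last run) plus one slice-and-reverse; objective: simpler.

-- ===== PORT A =====
-- loop body of A: state = (group, expected, broken)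
def pvStepA (step : Int) (st : List Int × Option Int × Bool) (val : Int) :
    List Int × Option Int × Bool :=
  if st.2.2 then st
  else if st.2.1 = some val ∨ st.2.1 = none then
    (st.1 ++ [val], some (val - step), false)
  else (st.1, st.2.1, true)

def last_consecutives (vals : List Int) (step : Int) : List Int :=
  (vals.reverse.foldl (pvStepA step) ([], none, false)).1

-- ===== PORT B =====
-- loop body of B: state = (start, i), pair = (prev, cur)
def pvStepB (step : Int) (st : Int × Int) (pc : Int × Int) : Int × Int :=
  ((if pc.2 ≠ pc.1 + step then st.2 else st.1), st.2 + 1)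

def last_consecutives_alt (vals : List Int) (step : Int) : List Int :=
  let start := ((vals.zip vals.tail).foldl (pvStepB step) (0, 1)).1
  (PySem.List.slice vals (some start) none).reverse

-- ===== PRECONDITION & SPEC =====
def Spec_last_consecutives (vals : List Int) (step : Int) (out : List Int) : Prop := out = last_consecutives_alt vals step
instance (vals : List Int) (step : Int) (out : List Int) : Decidable (Spec_last_consecutives vals step out) := by unfold Spec_last_consecutives; infer_instance

-- ===== CLAIM (what is proved, stated in full; the proofs are below) =====
def Claim_equal_last_consecutives : Prop := ∀ (vals : List Int) (step : Int), Dom_last_consecutives vals step → Spec_last_consecutives vals step (last_consecutives vals step)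

-- ===== LEMMAS AND PROOFS =====

-- canonical form: the last run, read off the reversed list
def takeRun (step e : Int) : List Int → List Int
  | [] => []
  | v :: rest => if v = e then v :: takeRun step (v - step) rest else []

def headRun (step : Int) : List Int → List Int
  | [] => []
  | v :: rest => v :: takeRun step (v - step) rest

-- ## A-side
theorem foldA_stuck (step : Int) (l : List Int) (s : List Int × Option Int × Bool)
    (h : s.2.2 = true) : l.foldl (pvStepA step) s = s := by
  induction l with
  | nil => rfl
  | cons v t ih => simp [List.foldl, pvStepA, h, ih]

theorem foldA_run (step : Int) (l : List Int) (g : List Int) (e : Int) :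
    (l.foldl (pvStepA step) (g, some e, false)).1 = g ++ takeRun step e l := by
  induction l generalizing g e with
  | nil => simp [takeRun]
  | cons v t ih =>
    by_cases hv : v = e
    · subst hv
      simp [List.foldl, pvStepA, takeRun, ih]
    · have he : ¬ (e = v) := fun h => hv h.symm
      have hstuck := foldA_stuck step t (g, some e, true) rfl
      simp [List.foldl, pvStepA, he, hstuck, takeRun, hv]

theorem A_char (vals : List Int) (step : Int) :
    last_consecutives vals step = headRun step vals.reverse := by
  unfold last_consecutives
  cases h : vals.reverse with
  | nil => simp [headRun]
  | cons v rest =>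
    simp [List.foldl, pvStepA, headRun, foldA_run]

-- ## B-side
-- explicit consecutive-pairs function, equal to zip with tail
def pairsOf : List Int → List (Int × Int)
  | [] => []
  | [_] => []
  | a :: b :: t => (a, b) :: pairsOf (b :: t)

theorem pairsOf_eq_zip (l : List Int) : pairsOf l = l.zip l.tail := by
  match l with
  | [] => rfl
  | [_] => rfl
  | a :: b :: t => simp [pairsOf, pairsOf_eq_zip (b :: t)]

theorem pairsOf_length (l : List Int) : (pairsOf l).length = l.length - 1 := by
  match l with
  | [] => rfl
  | [_] => rfl
  | a :: b :: t => simp [pairsOf, pairsOf_length (b :: t)]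

theorem pairsOf_snoc (ys : List Int) (x l : Int) (h : ys.getLast? = some l) :
    pairsOf (ys ++ [x]) = pairsOf ys ++ [(l, x)] := by
  match ys with
  | [] => simp at h
  | [a] => simp at h; subst h; rfl
  | a :: b :: t =>
    have h' : (b :: t).getLast? = some l := by
      simpa [List.getLast?_cons_cons] using h
    show (a, b) :: pairsOf (b :: t ++ [x]) = _
    rw [pairsOf_snoc (b :: t) x l h']
    rfl

theorem foldB_snd (step : Int) (ps : List (Int × Int)) (s i : Int) :
    (ps.foldl (pvStepB step) (s, i)).2 = i + ps.length := by
  induction ps generalizing s i with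
  | nil => simp
  | cons p t ih => simp [List.foldl, pvStepB, ih]; ring

theorem foldB_bounds (step : Int) (ps : List (Int × Int)) (s i : Int)
    (h0 : 0 ≤ s) (h1 : s < i) :
    0 ≤ (ps.foldl (pvStepB step) (s, i)).1 ∧
      (ps.foldl (pvStepB step) (s, i)).1 < (ps.foldl (pvStepB step) (s, i)).2 := by
  induction ps generalizing s i with
  | nil => exact ⟨h0, h1⟩
  | cons p t ih =>
    simp only [List.foldl, pvStepB]
    split <;> exact ih _ _ (by omega) (by omega)

-- start index of B with the fold written over pairsOf
def startOf (step : Int) (vals : List Int) : Int :=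
  ((pairsOf vals).foldl (pvStepB step) (0, 1)).1

theorem startOf_nonneg (step : Int) (vals : List Int) : 0 ≤ startOf step vals :=
  (foldB_bounds step (pairsOf vals) 0 1 (by omega) (by omega)).1

theorem startOf_lt (step : Int) (vals : List Int) (h : vals ≠ []) :
    startOf step vals < vals.length := by
  have hb := (foldB_bounds step (pairsOf vals) 0 1 (by omega) (by omega)).2
  have hs := foldB_snd step (pairsOf vals) 0 1
  have hl : (pairsOf vals).length = vals.length - 1 := pairsOf_length vals
  have hpos : 1 ≤ vals.length := by
    cases vals with
    | nil => exact absurd rfl h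
    | cons a t => simp
  unfold startOf
  omega

theorem B_eq_drop (vals : List Int) (step : Int) :
    last_consecutives_alt vals step =
      (vals.drop (startOf step vals).toNat).reverse := by
  unfold last_consecutives_alt
  show (PySem.List.slice vals (some (((vals.zip vals.tail).foldl (pvStepB step) (0, 1)).1)) none).reverse = _
  rw [← pairsOf_eq_zip]
  rw [show (List.foldl (pvStepB step) (0, 1) (pairsOf vals)).1 = startOf step vals from rfl]
  rw [PySem.List.slice_from _ (startOf_nonneg step vals)]

theorem startOf_snoc (step : Int) (ys : List Int) (x l : Int)
    (h : ys.getLast? = some l) :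
    startOf step (ys ++ [x]) =
      if x ≠ l + step then (ys.length : Int) else startOf step ys := by
  have hne : ys ≠ [] := by rintro rfl; simp at h
  unfold startOf
  rw [pairsOf_snoc ys x l h, List.foldl_append]
  have hs : ((pairsOf ys).foldl (pvStepB step) (0, 1)).2 = 1 + (pairsOf ys).length :=
    foldB_snd step (pairsOf ys) 0 1
  have hl : (pairsOf ys).length = ys.length - 1 := pairsOf_length ys
  have hpos : 1 ≤ ys.length := by
    cases ys with
    | nil => exact absurd rfl hne
    | cons a t => simp
  simp only [List.foldl, pvStepB]
  split <;> simp_all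

theorem B_char (vals : List Int) (step : Int) :
    last_consecutives_alt vals step = headRun step vals.reverse := by
  induction vals using List.reverseRecOn with
  | nil => rw [B_eq_drop]; simp [headRun]
  | append_singleton ys x ih =>
    rw [B_eq_drop]
    cases hys : ys.reverse with
    | nil =>
      have hnil : ys = [] := by simpa using congrArg List.reverse hys
      subst hnil
      simp [startOf, pairsOf, headRun, takeRun]
    | cons l rest =>
      have hlast : ys.getLast? = some l := by
        rw [List.getLast?_eq_head?_reverse, hys]; rfl
      have hne : ys ≠ [] := by rintro rfl; simp at hys
      have hrev : (ys ++ [x]).reverse = x :: l :: rest := by simp [hys]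
      rw [startOf_snoc step ys x l hlast, hrev]
      by_cases hx : x = l + step
      · have hle : (startOf step ys).toNat ≤ ys.length := by
          have h1 := startOf_lt step ys hne
          have h2 := startOf_nonneg step ys
          omega
        have hB : (List.drop (startOf step ys).toNat ys).reverse
            = headRun step ys.reverse := by
          rw [← B_eq_drop]; exact ih
        rw [hys] at hB
        rw [if_neg (by simp [hx]), List.drop_append_of_le_length hle,
          List.reverse_append]
        simp only [List.reverse_cons, List.reverse_nil, List.nil_append,
          List.singleton_append, hB]
        simp [headRun, takeRun, hx]
      · rw [if_pos (by simpa using hx)]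
        have ht : ((ys.length : Int)).toNat = ys.length := by simp
        rw [ht, List.drop_append_of_le_length (le_refl _), List.drop_length]
        simp [headRun, takeRun]
        intro h; exact hx (by omega)

-- ===== VERDICT (by name: the statement is the Claim_ definition above) =====
theorem last_consecutives_spec : Claim_equal_last_consecutives := by
  intro vals step _
  unfold Spec_last_consecutives
  rw [A_char, B_char]
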